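-- pv_equiv track=rewrite | github.com/chrisuzokwe/wireless-communications | cuzokwe-hw7/src/main.py | crossing_rate
-- ===== SOURCE A (Python) =====
-- def crossing_rate(sig, thresh):
--
--   above = True if sig[0] > thresh else False
--   crossings = 0
--
--   for i in sig:
--     if above and i < thresh:
--       crossings += 1
--       above = False
--
--     elif not above and i > thresh:
--       above = True
--
--     else:
--       pass
--
--   return crossings
-- ===== SOURCE B (Python) =====
-- def crossing_rate(sig, thresh):
--     signs = [x > thresh for x in sig if x != thresh]
--     return sum(1 for a, b in zip(signs, signs[1:]) if a and not b)
-- ===== Notes on version B (the rewrite author's own statement) =====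
-- stated objective: alternative
-- what changed: Replaces the stateful above-flag loop with building the list of decisive signs (strictly above/below, equals dropped) and counting True-then-False adjacent pairs with a pairwise zip scan.
import Mathlib
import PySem

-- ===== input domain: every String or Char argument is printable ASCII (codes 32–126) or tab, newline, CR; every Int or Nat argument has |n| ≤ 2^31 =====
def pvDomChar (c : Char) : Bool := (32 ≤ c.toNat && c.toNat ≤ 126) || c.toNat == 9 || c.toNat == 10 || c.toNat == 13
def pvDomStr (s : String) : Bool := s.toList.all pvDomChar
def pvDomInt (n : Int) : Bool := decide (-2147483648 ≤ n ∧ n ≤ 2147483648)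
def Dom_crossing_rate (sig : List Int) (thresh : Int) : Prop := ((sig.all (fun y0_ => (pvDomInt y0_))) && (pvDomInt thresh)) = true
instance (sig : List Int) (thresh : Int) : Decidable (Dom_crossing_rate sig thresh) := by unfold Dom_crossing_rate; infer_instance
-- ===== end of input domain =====

-- B replaces the stateful above-flag loop with a decisive-sign list plus a pairwise
-- True-then-False count (alternative decomposition, same cost).

-- ===== PORT A =====
-- 'sig[0]' raises IndexError on an empty list; Pre_ excludes that input, so the
-- getD default is never relevant inside Pre_.
def crossing_rate (sig : List Int) (thresh : Int) : Int :=
  let above : Bool := decide (((PySem.List.pyGet? sig 0).getD 0) > thresh)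
  let st :=
    sig.foldl (fun (s : Bool × Int) i =>
      if s.1 && decide (i < thresh) then (false, s.2 + 1)
      else if !s.1 && decide (i > thresh) then (true, s.2)
      else s) (above, 0)
  st.2

-- ===== PORT B =====
def crossing_rate_alt (sig : List Int) (thresh : Int) : Int :=
  let signs := (sig.filter (fun x => x != thresh)).map (fun x => decide (x > thresh))
  (((signs.zip signs.tail).filter (fun p => p.1 && !p.2)).length : Int)

-- ===== PRECONDITION & SPEC =====
-- Pre_ excludes exactly the inputs on which A raises IndexError: the empty signal.
def Pre_crossing_rate (sig : List Int) (thresh : Int) : Prop := sig ≠ []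
instance (sig : List Int) (thresh : Int) : Decidable (Pre_crossing_rate sig thresh) := by unfold Pre_crossing_rate; infer_instance
def pvWitness_crossing_rate : List Int × Int := ([1, -1, 2, -2], 0)

def Spec_crossing_rate (sig : List Int) (thresh : Int) (out : Int) : Prop := out = crossing_rate_alt sig thresh
instance (sig : List Int) (thresh : Int) (out : Int) : Decidable (Spec_crossing_rate sig thresh out) := by unfold Spec_crossing_rate; infer_instance

-- ===== CLAIM (what is proved, stated in full; the proofs are below) =====
def Claim_equal_crossing_rate : Prop := ∀ (sig : List Int) (thresh : Int), Dom_crossing_rate sig thresh → Pre_crossing_rate sig thresh → Spec_crossing_rate sig thresh (crossing_rate sig thresh)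

-- ===== LEMMAS AND PROOFS =====

-- decisive signs of a signal: equals-to-threshold dropped, rest mapped to (· > thresh)
def pvSigns (thresh : Int) (l : List Int) : List Bool :=
  (l.filter (fun x => x != thresh)).map (fun x => decide (x > thresh))

-- descent count of a Boolean sequence starting from state a
def pvDesc : Bool → List Bool → Int
  | _, [] => 0
  | a, b :: t => (if a && !b then 1 else 0) + pvDesc b t

-- pairwise True-then-False count, exactly B's expression
def pvPair (bs : List Bool) : Int :=
  (((bs.zip bs.tail).filter (fun p => p.1 && !p.2)).length : Int)

theorem pvSigns_cons (thresh x : Int) (t : List Int) :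
    pvSigns thresh (x :: t) =
      if x != thresh then decide (x > thresh) :: pvSigns thresh t else pvSigns thresh t := by
  simp only [pvSigns, List.filter_cons]
  split <;> simp

-- A's loop step, named for the proofs (definitionally the lambda in crossing_rate)
def pvStep (thresh : Int) (s : Bool × Int) (i : Int) : Bool × Int :=
  if s.1 && decide (i < thresh) then (false, s.2 + 1)
  else if !s.1 && decide (i > thresh) then (true, s.2)
  else s

-- A's loop computes c plus the descent count from state a over the decisive signs
theorem pvLoop (thresh : Int) : ∀ (l : List Int) (a : Bool) (c : Int),
    (l.foldl (pvStep thresh) (a, c)).2 = c + pvDesc a (pvSigns thresh l) := by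
  intro l
  induction l with
  | nil => intro a c; simp [pvSigns, pvDesc]
  | cons x t ih =>
    intro a c
    rw [List.foldl_cons, pvSigns_cons]
    rcases lt_trichotomy x thresh with h | h | h
    · have hne : (x != thresh) = true := by simp [bne]; omega
      cases a with
      | true =>
        rw [show pvStep thresh (true, c) x = (false, c + 1) from by
          simp [pvStep, h]]
        rw [ih]
        simp [hne, pvDesc, show ¬ x > thresh by omega]
        ring
      | false =>
        rw [show pvStep thresh (false, c) x = (false, c) from by
          simp [pvStep, show ¬ x > thresh by omega]]
        rw [ih]
        simp [hne, pvDesc, show ¬ x > thresh by omega]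
    · have hne : (x != thresh) = false := by simp [bne, h]
      rw [show pvStep thresh (a, c) x = (a, c) from by
        simp [pvStep, h]]
      rw [ih]
      simp [hne]
    · have hne : (x != thresh) = true := by simp [bne]; omega
      cases a with
      | true =>
        rw [show pvStep thresh (true, c) x = (true, c) from by
          simp [pvStep, show ¬ x < thresh by omega]]
        rw [ih]
        simp [hne, pvDesc, h]
      | false =>
        rw [show pvStep thresh (false, c) x = (true, c) from by
          simp [pvStep, show ¬ x < thresh by omega, h]]
        rw [ih]
        simp [hne, pvDesc, h]

-- B's pairwise count equals the descent count started from the first sign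
theorem pvPair_eq_desc : ∀ (bs : List Bool), pvPair bs = match bs with
    | [] => (0 : Int)
    | b :: t => pvDesc b t := by
  intro bs
  induction bs with
  | nil => simp [pvPair]
  | cons b t ih =>
    cases t with
    | nil => simp [pvPair, pvDesc]
    | cons b' t' =>
      simp only [pvPair, List.tail_cons, List.zip_cons_cons, List.filter_cons] at *
      by_cases h : (b && !b') = true
      · simp [h, pvDesc, ih]; ring
      · simp only [h]
        simp at h
        simp [pvDesc, ih]
        exact h

theorem pvDesc_shift (a : Bool) (bs : List Bool)
    (h : ∀ b, bs.head? = some b → (a && !b) = false) :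
    pvDesc a bs = pvPair bs := by
  rw [pvPair_eq_desc]
  cases bs with
  | nil => simp [pvDesc]
  | cons b t => simp [pvDesc, h b rfl]

-- ===== VERDICT (by name: the statement is the Claim_ definition above) =====
theorem crossing_rate_spec : Claim_equal_crossing_rate := by
  intro sig thresh _ hpre
  unfold Spec_crossing_rate crossing_rate crossing_rate_alt
  cases sig with
  | nil => exact absurd rfl hpre
  | cons x t =>
    rw [show (List.foldl (fun (s : Bool × Int) i =>
      if s.1 && decide (i < thresh) then (false, s.2 + 1)
      else if !s.1 && decide (i > thresh) then (true, s.2)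
      else s) (decide (((PySem.List.pyGet? (x :: t) 0).getD 0) > thresh), 0) (x :: t)).2
      = ((x :: t).foldl (pvStep thresh) (decide (((PySem.List.pyGet? (x :: t) 0).getD 0) > thresh), 0)).2 from rfl,
      pvLoop]
    show (0 : Int) + pvDesc (decide (((PySem.List.pyGet? (x :: t) 0).getD 0) > thresh)) (pvSigns thresh (x :: t)) = pvPair (pvSigns thresh (x :: t))
    rw [zero_add]
    have hget : (PySem.List.pyGet? (x :: t) 0).getD 0 = x := by
      simp [PySem.List.pyGet?, PySem.List.pyIdx?]
    rw [hget]
    apply pvDesc_shift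
    intro b hb
    rw [pvSigns_cons] at hb
    by_cases hx : (x != thresh) = true
    · simp [hx] at hb
      subst hb
      simp [gt_iff_lt]
    · simp only [Bool.not_eq_true] at hx
      have : x = thresh := by simpa [bne] using hx
      subst this
      simp
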